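-- pv_equiv track=rewrite | github.com/cryptoxinu/HealthBot | src/healthbot/data/clean_db/reporting.py | _build_labs_section
-- ===== SOURCE A (Python) =====
-- def _build_labs_section(labs: list[dict]) -> str:
--     if not labs:
--         return ""
--     parts: list[str] = ["## Recent Lab Results\n"]
--     has_lab = any(lab.get("source_lab") for lab in labs)
--     if has_lab:
--         parts.append("| Date | Test | Value | Unit | Reference | Flag | Lab |")
--         parts.append("|------|------|-------|------|-----------|------|-----|")
--     else:
--         parts.append("| Date | Test | Value | Unit | Reference | Flag |")
--         parts.append("|------|------|-------|------|-----------|------|")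
--     for lab in labs:
--         ref = ""
--         if lab.get("reference_low") is not None and lab.get("reference_high") is not None:
--             ref = f"{lab['reference_low']}-{lab['reference_high']}"
--         elif lab.get("reference_text"):
--             ref = lab["reference_text"]
--         row = (
--             f"| {lab.get('date_effective', '')} "
--             f"| {lab.get('test_name') or lab.get('canonical_name', '')} "
--             f"| {lab.get('value', '')} "
--             f"| {lab.get('unit', '')} "
--             f"| {ref} "
--             f"| {lab.get('flag', '')} "
--         )
--         if has_lab:
--             row += f"| {lab.get('source_lab', '')} |"
--         else:
--             row += "|"
--         parts.append(row)
--     parts.append("")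
--     return "\n".join(parts)
-- ===== SOURCE B (Python) =====
-- def _build_labs_section(labs: list[dict]) -> str:
--     if not labs:
--         return ""
--
--     def _ref(lab: dict) -> str:
--         lo = lab.get("reference_low")
--         hi = lab.get("reference_high")
--         if lo is not None and hi is not None:
--             return f"{lo}-{hi}"
--         return lab.get("reference_text") or ""
--
--     cols = [
--         ("Date", lambda l: l.get("date_effective", "")),
--         ("Test", lambda l: l.get("test_name") or l.get("canonical_name", "")),
--         ("Value", lambda l: l.get("value", "")),
--         ("Unit", lambda l: l.get("unit", "")),
--         ("Reference", _ref),
--         ("Flag", lambda l: l.get("flag", "")),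
--     ]
--     if any(lab.get("source_lab") for lab in labs):
--         cols.append(("Lab", lambda l: l.get("source_lab", "")))
--
--     header = "".join(f"| {h} " for h, _ in cols) + "|"
--     sep = "".join("|" + "-" * (len(h) + 2) for h, _ in cols) + "|"
--     rows = ["".join(f"| {f(lab)} " for _, f in cols) + "|" for lab in labs]
--     return "\n".join(["## Recent Lab Results\n", header, sep] + rows + [""])
-- ===== Notes on version B (the rewrite author's own statement) =====
-- stated objective: alternative
-- what changed: B replaces A's hard-coded header/separator literals and per-row conditional concatenation with a data-driven table: a list of (header, extractor) column definitions (with the 'Lab' column appended once when any lab has a truthy source_lab), from which the header row, the dash separator row and every data row are generated uniformly by joining over the columns.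
import Mathlib
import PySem

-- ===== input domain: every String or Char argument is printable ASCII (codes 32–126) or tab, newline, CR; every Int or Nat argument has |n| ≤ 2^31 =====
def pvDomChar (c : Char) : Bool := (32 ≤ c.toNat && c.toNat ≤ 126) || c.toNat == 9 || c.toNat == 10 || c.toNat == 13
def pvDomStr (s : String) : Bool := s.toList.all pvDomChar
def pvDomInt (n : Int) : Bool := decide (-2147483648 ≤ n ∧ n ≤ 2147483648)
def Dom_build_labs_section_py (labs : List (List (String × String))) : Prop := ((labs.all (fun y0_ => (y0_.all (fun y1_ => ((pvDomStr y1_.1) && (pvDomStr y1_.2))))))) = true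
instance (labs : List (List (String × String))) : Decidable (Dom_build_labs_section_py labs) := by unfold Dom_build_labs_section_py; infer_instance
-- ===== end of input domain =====

-- B re-implements the table data-driven: a list of (header, extractor) column definitions replaces A's
-- hard-coded header/separator literals and per-row conditional concatenation (objective: alternative).
-- Both ports look keys up by first match (PySem.Dict over the association list), per the type convention.

-- ===== PORT A =====
-- loop body of A's 'for lab in labs', extracted as a helper (literal transliteration of the row build)
def pvA_row (has_lab : Bool) (lab : List (String × String)) : String :=
  let d := PySem.Dict.mk lab
  let ref : String :=
    if (d.get? "reference_low").isSome && (d.get? "reference_high").isSome then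
      d.getD "reference_low" "" ++ "-" ++ d.getD "reference_high" ""
    else if d.getD "reference_text" "" != "" then d.getD "reference_text" ""
    else ""
  let row : String :=
    "| " ++ d.getD "date_effective" "" ++ " " ++
    "| " ++ (if d.getD "test_name" "" != "" then d.getD "test_name" "" else d.getD "canonical_name" "") ++ " " ++
    "| " ++ d.getD "value" "" ++ " " ++
    "| " ++ d.getD "unit" "" ++ " " ++
    "| " ++ ref ++ " " ++
    "| " ++ d.getD "flag" "" ++ " "
  if has_lab then row ++ ("| " ++ d.getD "source_lab" "" ++ " |") else row ++ "|"

def build_labs_section_py (labs : List (List (String × String))) : String :=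
  if labs = [] then "" else
  let parts : List String := ["## Recent Lab Results\n"]
  let has_lab : Bool := labs.any (fun lab => (PySem.Dict.mk lab).getD "source_lab" "" != "")
  let parts : List String :=
    if has_lab then
      parts ++ ["| Date | Test | Value | Unit | Reference | Flag | Lab |",
                "|------|------|-------|------|-----------|------|-----|"]
    else
      parts ++ ["| Date | Test | Value | Unit | Reference | Flag |",
                "|------|------|-------|------|-----------|------|"]
  let parts : List String := labs.foldl (fun parts lab => parts ++ [pvA_row has_lab lab]) parts
  PySem.Str.join "\n" (parts ++ [""])

-- ===== PORT B =====
-- Source B's _ref helper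
def pvB_ref (lab : List (String × String)) : String :=
  let lo := (PySem.Dict.mk lab).get? "reference_low"
  let hi := (PySem.Dict.mk lab).get? "reference_high"
  if lo.isSome && hi.isSome then lo.getD "" ++ "-" ++ hi.getD ""
  else if (PySem.Dict.mk lab).getD "reference_text" "" != "" then
    (PySem.Dict.mk lab).getD "reference_text" ""
  else ""

-- Source B's column table: (header, extractor) pairs; the 'Lab' column is appended only when some lab
-- has a truthy 'source_lab'
def pvB_cols (hasLab : Bool) : List (String × (List (String × String) → String)) :=
  [("Date", fun l => (PySem.Dict.mk l).getD "date_effective" ""),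
   ("Test", fun l => if (PySem.Dict.mk l).getD "test_name" "" != "" then
                       (PySem.Dict.mk l).getD "test_name" ""
                     else (PySem.Dict.mk l).getD "canonical_name" ""),
   ("Value", fun l => (PySem.Dict.mk l).getD "value" ""),
   ("Unit", fun l => (PySem.Dict.mk l).getD "unit" ""),
   ("Reference", pvB_ref),
   ("Flag", fun l => (PySem.Dict.mk l).getD "flag" "")] ++
  (if hasLab then [("Lab", fun l => (PySem.Dict.mk l).getD "source_lab" "")] else [])

def build_labs_section_py_alt (labs : List (List (String × String))) : String :=
  if labs = [] then "" else
  let cols := pvB_cols (labs.any (fun lab => (PySem.Dict.mk lab).getD "source_lab" "" != ""))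
  let header := PySem.Str.join "" (cols.map (fun c => "| " ++ c.1 ++ " ")) ++ "|"
  let sep := PySem.Str.join "" (cols.map (fun c => "|" ++ String.ofList (PySem.List.pyRepeat ['-'] (PySem.Str.len c.1 + 2)))) ++ "|"
  let rows := labs.map (fun lab => PySem.Str.join "" (cols.map (fun c => "| " ++ c.2 lab ++ " ")) ++ "|")
  PySem.Str.join "\n" (["## Recent Lab Results\n", header, sep] ++ rows ++ [""])

-- ===== PRECONDITION & SPEC =====
def Spec_build_labs_section_py (labs : List (List (String × String))) (out : String) : Prop := out = build_labs_section_py_alt labs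
instance (labs : List (List (String × String))) (out : String) : Decidable (Spec_build_labs_section_py labs out) := by unfold Spec_build_labs_section_py; infer_instance

-- ===== CLAIM (what is proved, stated in full; the proofs are below) =====
def Claim_equal_build_labs_section_py : Prop := ∀ (labs : List (List (String × String))), Dom_build_labs_section_py labs → Spec_build_labs_section_py labs (build_labs_section_py labs)

-- ===== LEMMAS AND PROOFS =====
-- per-row agreement: A's concatenated row equals B's column-table row, for either table shape
theorem pvRow_eq (has_lab : Bool) (lab : List (String × String)) :
    pvA_row has_lab lab
      = PySem.Str.join "" ((pvB_cols has_lab).map (fun c => "| " ++ c.2 lab ++ " ")) ++ "|" := by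
  unfold pvA_row pvB_cols pvB_ref
  cases has_lab <;>
    · apply String.toList_inj.mp
      simp only [List.map, List.append_nil, List.cons_append, List.nil_append, if_true,
        if_false, Bool.false_eq_true, PySem.Dict.getD]
      split_ifs <;>
        simp [PySem.Str.join, PySem.Chars.join, String.toList_append, List.intercalate,
          List.intersperse, List.append_assoc]

-- B's generated header and separator rows coincide with A's literals, for either table shape
theorem pvHdr_eq (b : Bool) :
    (PySem.Str.join "" ((pvB_cols b).map (fun c => "| " ++ c.1 ++ " ")) ++ "|" : String)
      = if b then "| Date | Test | Value | Unit | Reference | Flag | Lab |"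
        else "| Date | Test | Value | Unit | Reference | Flag |" := by
  cases b <;> decide

theorem pvSep_eq (b : Bool) :
    (PySem.Str.join "" ((pvB_cols b).map
        (fun c => "|" ++ String.ofList (PySem.List.pyRepeat ['-'] (PySem.Str.len c.1 + 2)))) ++ "|" : String)
      = if b then "|------|------|-------|------|-----------|------|-----|"
        else "|------|------|-------|------|-----------|------|" := by
  cases b <;> decide

theorem build_labs_section_py_eq (labs : List (List (String × String))) :
    build_labs_section_py labs = build_labs_section_py_alt labs := by
  unfold build_labs_section_py build_labs_section_py_alt
  by_cases h : labs = []
  · simp [h]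
  · simp only [if_neg h]
    rw [PySem.List.foldl_append_singleton_eq_map]
    rw [pvHdr_eq, pvSep_eq, List.map_congr_left (fun lab _ => pvRow_eq _ lab)]
    cases hb : labs.any (fun lab => (PySem.Dict.mk lab).getD "source_lab" "" != "") <;>
      simp

-- ===== VERDICT (by name: the statement is the Claim_ definition above) =====
theorem build_labs_section_py_spec : Claim_equal_build_labs_section_py := by
  intro labs _
  exact build_labs_section_py_eq labs
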